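-- pv_equiv track=rewrite | github.com/GRetriever/Programmers | 프로그래머스/1/133502. 햄버거 만들기/햄버거 만들기.py | solution
-- ===== SOURCE A (Python) =====
-- def solution(ingredient):
--     answer = 0
--     burger = []
--     for i in ingredient:
--         burger.append(i)
--         if burger[-4:] == [1,2,3,1]:
--             answer += 1
--             del burger[-4:]
--     return answer
-- ===== SOURCE B (Python) =====
-- def solution(ingredient):
--     lst = list(ingredient)
--     answer = 0
--     i = 0
--     while i <= len(lst) - 4:
--         if lst[i:i+4] == [1, 2, 3, 1]:
--             del lst[i:i+4]
--             answer += 1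
--             i = max(0, i - 3)
--         else:
--             i += 1
--     return answer
-- ===== Notes on version B (the rewrite author's own statement) =====
-- stated objective: alternative
-- what changed: Replaces A's single forward pass maintaining a stack (append, check top four, delete) with an in-place scan-and-remove: a pointer walks the list, deletes any burger-pattern window it finds and backtracks three positions to catch newly exposed patterns.
import Mathlib
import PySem

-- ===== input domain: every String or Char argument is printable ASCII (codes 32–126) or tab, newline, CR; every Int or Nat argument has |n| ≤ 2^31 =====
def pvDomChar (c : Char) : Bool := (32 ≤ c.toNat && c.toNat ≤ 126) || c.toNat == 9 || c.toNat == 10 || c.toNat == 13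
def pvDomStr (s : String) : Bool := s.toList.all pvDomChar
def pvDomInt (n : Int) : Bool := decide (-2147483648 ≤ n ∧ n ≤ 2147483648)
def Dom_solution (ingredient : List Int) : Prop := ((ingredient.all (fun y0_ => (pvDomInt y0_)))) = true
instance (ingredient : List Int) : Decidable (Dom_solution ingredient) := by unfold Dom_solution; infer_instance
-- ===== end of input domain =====

-- B replaces A's stack pass by an index scan that deletes each [1,2,3,1] window in place and backtracks 3; same O(n) cost, different traversal (objective: alternative).

-- ===== PORT A =====
-- body of A's for-loop: append, check burger[-4:], delete on match
def stepA (st : Int × List Int) (x : Int) : Int × List Int :=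
  let burger := st.2 ++ [x]
  if PySem.List.slice burger (some (-4)) none = ([1, 2, 3, 1] : List Int) then
    (st.1 + 1, PySem.List.slice burger none (some (-4)))
  else
    (st.1, burger)

def solution (ingredient : List Int) : Int :=
  (ingredient.foldl stepA ((0 : Int), ([] : List Int))).1

-- ===== PORT B =====
-- while-loop of Source B; i is Python's int index, always ≥ 0 (Nat), and `i - 3` on Nat is exactly max(0, i-3);
-- `del lst[i:i+4]` (0 ≤ i) is exactly lst.take i ++ lst.drop (i+4)
def loopB (lst : List Int) (i : Nat) (answer : Int) : Int :=
  if i + 4 ≤ lst.length then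
    if PySem.List.slice lst (some (i : Int)) (some ((i : Int) + 4)) = ([1, 2, 3, 1] : List Int) then
      loopB (lst.take i ++ lst.drop (i + 4)) (i - 3) (answer + 1)
    else
      loopB lst (i + 1) answer
  else
    answer
termination_by lst.length - i
decreasing_by
  · simp only [List.length_append, List.length_take, List.length_drop]; omega
  · omega

def solution_alt (ingredient : List Int) : Int :=
  loopB ingredient 0 0

-- ===== PRECONDITION & SPEC =====
def Spec_solution (ingredient : List Int) (out : Int) : Prop := out = solution_alt ingredient
instance (ingredient : List Int) (out : Int) : Decidable (Spec_solution ingredient out) := by unfold Spec_solution; infer_instance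

-- ===== CLAIM (what is proved, stated in full; the proofs are below) =====
def Claim_equal_solution : Prop := ∀ (ingredient : List Int), Dom_solution ingredient → Spec_solution ingredient (solution ingredient)

-- ===== LEMMAS AND PROOFS =====

-- slice bridges
lemma sliceFrom4 (b : List Int) :
    PySem.List.slice b (some (-4)) none = b.drop (b.length - 4) := by
  rw [PySem.List.slice_from_neg_ofNat b 4 (by omega)]

lemma sliceTo4 (b : List Int) :
    PySem.List.slice b none (some (-4)) = b.take (b.length - 4) := by
  rw [PySem.List.slice_to_neg_ofNat b 4 (by omega)]

lemma sliceWin (lst : List Int) (i : Nat) :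
    PySem.List.slice lst (some (i : Int)) (some ((i : Int) + 4)) = (lst.drop i).take 4 := by
  have h := PySem.List.slice_natCast_add (xs := lst) (j := i) (n := 4)
  simpa using h

-- unconditional split of a drop
lemma split_at (lst : List Int) (i k : Nat) :
    lst.drop i = (lst.drop i).take k ++ lst.drop (i + k) := by
  conv_lhs => rw [← List.take_append_drop k (lst.drop i)]
  rw [List.drop_drop]

lemma take_concat (lst : List Int) (m : Nat) (h : m < lst.length) :
    lst.take m ++ [lst[m]] = lst.take (m + 1) := by
  rw [List.take_succ]
  simp [List.getElem?_eq_getElem h]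

-- window inside a prefix of an append
lemma window_prefix (xs ys : List Int) (j : Nat) (h : j + 4 ≤ xs.length) :
    ((xs ++ ys).drop j).take 4 = (xs.drop j).take 4 := by
  rw [List.drop_append_of_le_length (by omega),
      List.take_append_of_le_length (by simp [List.length_drop]; omega)]

-- window inside a take
lemma window_take (lst : List Int) (i j : Nat) (h : j + 4 ≤ i) :
    ((lst.take i).drop j).take 4 = (lst.drop j).take 4 := by
  rw [List.drop_take, List.take_take]
  congr 1
  omega

-- pushing elements lst[i:i+k) onto burger = lst.take i only appends, as long as
-- no pattern window ends inside the pushed range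
lemma push_run (lst : List Int) (k : Nat) : ∀ (i : Nat) (a : Int),
    i + k ≤ lst.length →
    (∀ j, j + 4 ≤ i + k → (lst.drop j).take 4 ≠ [1, 2, 3, 1]) →
    List.foldl stepA (a, lst.take i) ((lst.drop i).take k) = (a, lst.take (i + k)) := by
  induction k with
  | zero => intro i a _ _; simp
  | succ k ih =>
    intro i a hlen hwin
    have hi : i < lst.length := by omega
    have hdt : (lst.drop i).take (k + 1) = lst[i] :: ((lst.drop (i + 1)).take k) := by
      rw [List.drop_eq_getElem_cons hi, List.take_succ_cons]
    rw [hdt, List.foldl_cons]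
    have hstep : stepA (a, lst.take i) lst[i] = (a, lst.take (i + 1)) := by
      unfold stepA
      simp only [take_concat lst i hi, sliceFrom4]
      have hlen1 : (lst.take (i + 1)).length = i + 1 := by
        simp [List.length_take]; omega
      by_cases h4 : 4 ≤ i + 1
      · have hw : (lst.take (i + 1)).drop ((lst.take (i + 1)).length - 4)
              = (lst.drop (i + 1 - 4)).take 4 := by
          rw [hlen1, List.drop_take]
          congr 1
          omega
        rw [hw, if_neg (hwin (i + 1 - 4) (by omega))]
      · have hsh : ((lst.take (i + 1)).drop ((lst.take (i + 1)).length - 4)).length ≤ 3 := by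
          simp [List.length_drop, hlen1]; omega
        rw [if_neg (by intro hEq; rw [hEq] at hsh; simp at hsh)]
    rw [hstep, show i + (k + 1) = (i + 1) + k from by omega]
    exact ih (i + 1) a (by omega) (by intro j hj; exact hwin j (by omega))

-- main simulation: loopB from state (lst, i, a) computes what A's fold computes
-- from burger = lst.take i over the rest, given no pattern occurrence starts before i
lemma loop_eq (n : Nat) : ∀ (lst : List Int) (i : Nat) (a : Int),
    lst.length - i ≤ n →
    (∀ j, j < i → (lst.drop j).take 4 ≠ [1, 2, 3, 1]) →
    loopB lst i a = (List.foldl stepA (a, lst.take i) (lst.drop i)).1 := by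
  induction n with
  | zero =>
    intro lst i a hn _
    have hge : lst.length ≤ i := by omega
    rw [loopB, if_neg (by omega)]
    simp [List.drop_eq_nil_of_le hge]
  | succ n ih =>
    intro lst i a hn hinv
    by_cases hlen : i + 4 ≤ lst.length
    · rw [loopB, if_pos hlen, sliceWin]
      by_cases hpat : (lst.drop i).take 4 = [1, 2, 3, 1]
      · rw [if_pos hpat]
        have hpush3 := push_run lst 3 i a (by omega)
          (by intro j hj; exact hinv j (by omega))
        have hi3 : i + 3 < lst.length := by omega
        have hstep4 : stepA (a, lst.take (i + 3)) lst[i + 3] = (a + 1, lst.take i) := by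
          unfold stepA
          simp only [take_concat lst (i + 3) hi3, sliceFrom4, sliceTo4]
          have hlen4 : (lst.take (i + 3 + 1)).length = i + 4 := by
            simp [List.length_take]; omega
          have hwin4 : (lst.take (i + 3 + 1)).drop ((lst.take (i + 3 + 1)).length - 4)
              = (lst.drop i).take 4 := by
            rw [hlen4, Nat.add_sub_cancel, List.drop_take]
            congr 1
            omega
          rw [if_pos (by rw [hwin4]; exact hpat)]
          rw [hlen4, Nat.add_sub_cancel, List.take_take]
          congr 2
          omega
        -- evaluate A's fold over lst.drop i: 3 pushes, then the matching push
        have hfold : (List.foldl stepA (a, lst.take i) (lst.drop i)).1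
            = (List.foldl stepA (a + 1, lst.take i) (lst.drop (i + 4))).1 := by
          conv_lhs => rw [split_at lst i 3, List.foldl_append, hpush3,
            List.drop_eq_getElem_cons hi3, List.foldl_cons, hstep4]
        rw [hfold]
        -- the recursive side
        set lst' := lst.take i ++ lst.drop (i + 4) with hlst'
        have htki : (lst.take i).length = i := by simp [List.length_take]; omega
        have hlen' : lst'.length = lst.length - 4 := by
          simp [hlst', List.length_append, List.length_take, List.length_drop]; omega
        have hinv' : ∀ j, j < i - 3 → (lst'.drop j).take 4 ≠ [1, 2, 3, 1] := by
          intro j hj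
          rw [hlst', window_prefix _ _ j (by omega), window_take lst i j (by omega)]
          exact hinv j (by omega)
        rw [ih lst' (i - 3) (a + 1) (by omega) hinv']
        -- bridge: fold from take (i-3) over drop (i-3) equals fold from take i over drop (i+4)
        have htk' : lst'.take (i - 3) = lst.take (i - 3) := by
          rw [hlst', List.take_append_of_le_length (by omega), List.take_take]
          congr 1
          omega
        have hds := split_at lst' (i - 3) (i - (i - 3))
        rw [show i - 3 + (i - (i - 3)) = i from by omega] at hds
        have hpush' := push_run lst' (i - (i - 3)) (i - 3) (a + 1)
          (by omega)
          (by intro j hj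
              have hj4 : j + 4 ≤ i := by omega
              rw [hlst', window_prefix _ _ j (by omega), window_take lst i j hj4]
              exact hinv j (by omega))
        rw [show i - 3 + (i - (i - 3)) = i from by omega] at hpush'
        have hdr' : lst'.drop i = lst.drop (i + 4) := by
          rw [hlst', List.drop_append_of_le_length (by omega)]
          simp [List.drop_take]
        have htki' : lst'.take i = lst.take i := by
          rw [hlst', List.take_append_of_le_length (by omega)]
          simp [List.take_take]
        rw [hds, List.foldl_append, hpush', hdr', htki']
      · rw [if_neg hpat]
        have hinv1 : ∀ j, j < i + 1 → (lst.drop j).take 4 ≠ [1, 2, 3, 1] := by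
          intro j hj
          rcases Nat.lt_or_ge j i with h | h
          · exact hinv j h
          · rw [show j = i from by omega]; exact hpat
        rw [ih lst (i + 1) a (by omega) hinv1]
        -- one harmless push
        have hi : i < lst.length := by omega
        have h1 := push_run lst 1 i a (by omega) (by intro j hj; exact hinv j (by omega))
        conv_rhs => rw [split_at lst i 1, List.foldl_append, h1]
    · rw [loopB, if_neg hlen]
      by_cases hile : i ≤ lst.length
      · have h := push_run lst (lst.length - i) i a (by omega)
          (by intro j hj hEq
              rcases Nat.lt_or_ge j i with hji | hji
              · exact hinv j hji hEq
              · have hsh : ((lst.drop j).take 4).length ≤ 3 := by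
                  simp [List.length_take, List.length_drop]; omega
                rw [hEq] at hsh; simp at hsh)
        have hts : (lst.drop i).take (lst.length - i) = lst.drop i :=
          List.take_of_length_le (by simp)
        rw [hts] at h
        rw [h]
      · rw [List.drop_eq_nil_of_le (by omega)]
        simp

-- ===== VERDICT (by name: the statement is the Claim_ definition above) =====
theorem solution_spec : Claim_equal_solution := by
  intro ingredient _
  unfold Spec_solution solution solution_alt
  have h := loop_eq ingredient.length ingredient 0 0 (by omega) (by intro j hj; omega)
  simpa using h.symm
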